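-- pv_equiv track=rewrite | github.com/sepehrmaleki369/ribbs | core/general_dataset/splits.py | _filter_complete_no_split
-- ===== SOURCE A (Python) =====
-- from collections import defaultdict
-- from typing import Dict, List, Any, Tuple
--
-- def _filter_complete_no_split(records: List[Dict[str, str]], required_modalities: List[str]) -> List[Dict[str, str]]:
--     """
--     Given a flat list of records without split information,
--     drop any stems missing one of the required_modalities.
--     """
--     # Group records by stem
--     by_stem: Dict[str, List[Dict[str, str]]] = defaultdict(list)
--     for rec in records:
--         stem = rec["stem"]
--         by_stem[stem].append(rec)
--
--     # Keep only those groups whose modalities cover the required set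
--     req_set = set(required_modalities)
--     complete: List[Dict[str, str]] = []
--     for stem, recs in by_stem.items():
--         mods = {r["modality"] for r in recs}
--         if mods >= req_set:
--             complete.extend(recs)
--
--     return complete
-- ===== SOURCE B (Python) =====
-- def _filter_complete_no_split(records, required_modalities):
--     """
--     Drop any stems missing one of the required_modalities.
--     Single scan over first-appearance stems; no grouping dict:
--     a stem is kept iff every required modality occurs among its records.
--     """
--     out = []
--     done = set()
--     for rec in records:
--         stem = rec["stem"]
--         if stem in done:
--             continue
--         done.add(stem)
--         if all(any(r["stem"] == stem and r["modality"] == m for r in records)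
--                for m in required_modalities):
--             out.extend(r for r in records if r["stem"] == stem)
--     return out
-- ===== Notes on version B (the rewrite author's own statement) =====
-- stated objective: alternative
-- what changed: Replaces the defaultdict group-by-stem plus per-group set-superset pass with a single scan over first-appearance stems that decides completeness by directly searching the record list for each required (stem, modality) pair and re-filters the records per kept stem; no grouping dict or modality sets are built.
import Mathlib
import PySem

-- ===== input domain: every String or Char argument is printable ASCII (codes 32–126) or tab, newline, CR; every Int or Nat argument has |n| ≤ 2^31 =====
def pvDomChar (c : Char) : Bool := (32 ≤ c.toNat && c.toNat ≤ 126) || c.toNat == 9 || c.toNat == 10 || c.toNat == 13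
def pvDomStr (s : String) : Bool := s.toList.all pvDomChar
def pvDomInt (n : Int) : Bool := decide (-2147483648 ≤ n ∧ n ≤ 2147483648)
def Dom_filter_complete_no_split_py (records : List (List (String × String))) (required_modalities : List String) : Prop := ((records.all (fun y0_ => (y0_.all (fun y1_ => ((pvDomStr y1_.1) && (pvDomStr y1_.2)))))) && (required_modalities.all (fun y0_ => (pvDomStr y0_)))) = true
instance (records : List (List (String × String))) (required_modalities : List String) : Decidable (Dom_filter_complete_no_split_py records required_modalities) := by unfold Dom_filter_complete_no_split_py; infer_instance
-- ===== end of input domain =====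

-- B replaces A's defaultdict grouping + per-group modality-set superset test by a single scan over
-- first-appearance stems, deciding completeness by direct search of the record list (alternative
-- decomposition, not faster). Equivalence of the return value is proved on Pre_.

-- rec["k"] on a dict modelled as an association list: first match; "" only reached outside Pre_.
def pvGet (rec : List (String × String)) (k : String) : String :=
  ((rec.find? (fun p => p.1 == k)).map (·.2)).getD ""

-- ===== PORT A =====
def filter_complete_no_split_py (records : List (List (String × String))) (required_modalities : List String) : List (List (String × String)) :=
  let by_stem : PySem.Dict String (List (List (String × String))) :=
    records.foldl (fun d rec => d.modify (pvGet rec "stem") [] (fun l => l ++ [rec])) PySem.Dict.empty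
  let req_set : PySem.Set String := PySem.Set.ofList required_modalities
  by_stem.items.foldl (fun complete p =>
    let mods : PySem.Set String := PySem.Set.ofList (p.2.map (fun r => pvGet r "modality"))
    if PySem.Set.issuperset mods req_set then complete ++ p.2 else complete) []

-- ===== PORT B =====
def filter_complete_no_split_py_alt (records : List (List (String × String))) (required_modalities : List String) : List (List (String × String)) :=
  (records.foldl (fun (acc : List (List (String × String)) × PySem.Set String) rec =>
      let stem := pvGet rec "stem"
      if PySem.Set.contains acc.2 stem then acc
      else
        let done := PySem.Set.add acc.2 stem
        if required_modalities.all (fun m =>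
             records.any (fun r => pvGet r "stem" == stem && pvGet r "modality" == m))
        then (acc.1 ++ records.filter (fun r => pvGet r "stem" == stem), done)
        else (acc.1, done))
    ([], PySem.Set.empty)).1

-- ===== PRECONDITION & SPEC =====
-- Pre_ excludes exactly the inputs where Python A raises KeyError: a record missing "stem" or "modality".
def Pre_filter_complete_no_split_py (records : List (List (String × String))) (required_modalities : List String) : Prop :=
  ∀ rec ∈ records, (rec.find? (fun p => p.1 == "stem")).isSome = true ∧ (rec.find? (fun p => p.1 == "modality")).isSome = true
instance (records : List (List (String × String))) (required_modalities : List String) : Decidable (Pre_filter_complete_no_split_py records required_modalities) := by unfold Pre_filter_complete_no_split_py; infer_instance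

def pvWitness_filter_complete_no_split_py : (List (List (String × String))) × List String :=
  ([[("stem", "a"), ("modality", "m")], [("stem", "a"), ("modality", "n")]], ["m", "n"])

def Spec_filter_complete_no_split_py (records : List (List (String × String))) (required_modalities : List String) (out : List (List (String × String))) : Prop := out = filter_complete_no_split_py_alt records required_modalities
instance (records : List (List (String × String))) (required_modalities : List String) (out : List (List (String × String))) : Decidable (Spec_filter_complete_no_split_py records required_modalities out) := by unfold Spec_filter_complete_no_split_py; infer_instance

-- ===== CLAIM (what is proved, stated in full; the proofs are below) =====
def Claim_equal_filter_complete_no_split_py : Prop := ∀ (records : List (List (String × String))) (required_modalities : List String), Dom_filter_complete_no_split_py records required_modalities → Pre_filter_complete_no_split_py records required_modalities → Spec_filter_complete_no_split_py records required_modalities (filter_complete_no_split_py records required_modalities)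

-- ===== LEMMAS AND PROOFS =====

-- the group of records carrying stem s, in original order
def pvGroup (records : List (List (String × String))) (s : String) : List (List (String × String)) :=
  records.filter (fun r => pvGet r "stem" == s)

-- A's keep test for stem s
def pvTestA (records : List (List (String × String))) (rms : List String) (s : String) : Bool :=
  PySem.Set.issuperset (PySem.Set.ofList ((pvGroup records s).map (fun r => pvGet r "modality"))) (PySem.Set.ofList rms)

-- B's keep test for stem s
def pvTestB (records : List (List (String × String))) (rms : List String) (s : String) : Bool :=
  rms.all (fun m => records.any (fun r => pvGet r "stem" == s && pvGet r "modality" == m))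

theorem byStem_eq_map (records : List (List (String × String))) :
    (records.foldl (fun d rec => d.modify (pvGet rec "stem") [] (fun l => l ++ [rec])) (PySem.Dict.empty : PySem.Dict String (List (List (String × String)))))
    = ((records.map (fun r => (pvGet r "stem", r))).foldl (fun d p => d.modify p.1 [] (fun l => l ++ [p.2])) PySem.Dict.empty) :=
  (List.foldl_map (f := fun r => (pvGet r "stem", r)) (g := fun d p => d.modify p.1 [] fun l => l ++ [p.2]) (l := records) (init := PySem.Dict.empty)).symm

theorem byStem_getD (records : List (List (String × String))) (s : String) :
    (records.foldl (fun d rec => d.modify (pvGet rec "stem") [] (fun l => l ++ [rec])) (PySem.Dict.empty : PySem.Dict String (List (List (String × String))))).getD s []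
    = pvGroup records s := by
  rw [byStem_eq_map, PySem.Dict.getD_foldl_modify_append]
  simp [pvGroup, List.filter_map, Function.comp_def]

theorem byStem_keys (records : List (List (String × String))) :
    (records.foldl (fun d rec => d.modify (pvGet rec "stem") [] (fun l => l ++ [rec])) (PySem.Dict.empty : PySem.Dict String (List (List (String × String))))).keys
    = PySem.Set.ofList (records.map (fun r => pvGet r "stem")) := by
  rw [PySem.Dict.keys_foldl_modify_key (key := fun r => pvGet r "stem") (f := fun _ rec => fun l => l ++ [rec])]
  simp [PySem.Dict.keys_empty, PySem.Set.update_nil_left]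

theorem byStem_nodup (records : List (List (String × String))) :
    (records.foldl (fun d rec => d.modify (pvGet rec "stem") [] (fun l => l ++ [rec])) (PySem.Dict.empty : PySem.Dict String (List (List (String × String))))).keys.Nodup := by
  exact PySem.Dict.nodup_keys_foldl_modify_key records (fun r => pvGet r "stem") [] (fun _ rec => fun l => l ++ [rec]) PySem.Dict.empty (by simp [PySem.Dict.keys_empty])

theorem A_normal (records : List (List (String × String))) (rms : List String) :
    filter_complete_no_split_py records rms
    = (PySem.Set.ofList (records.map (fun r => pvGet r "stem"))).flatMap
        (fun s => if pvTestA records rms s then pvGroup records s else []) := by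
  simp only [filter_complete_no_split_py]
  rw [PySem.Dict.items_eq_map_keys _ (byStem_nodup records) []]
  rw [List.map_congr_left (fun k _ => by rw [byStem_getD records k])]
  rw [byStem_keys records]
  rw [List.foldl_map]
  dsimp only
  have hbody : (fun (x : List (List (String × String))) y => if (PySem.Set.ofList (List.map (fun r => pvGet r "modality") (pvGroup records y))).issuperset (PySem.Set.ofList rms) = true then x ++ pvGroup records y else x)
      = (fun x y => x ++ (if pvTestA records rms y then pvGroup records y else [])) := by
    funext x y
    by_cases h : pvTestA records rms y
    · rw [if_pos h]; rw [if_pos (by simpa [pvTestA] using h)]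
    · rw [if_neg h]; rw [if_neg (by simpa [pvTestA] using h)]; simp
  rw [hbody, PySem.List.foldl_append_eq_flatMap]
  simp

-- the stems of ks not yet in done, first occurrences in order
def pvNewStems (done : PySem.Set String) (ks : List String) : List String :=
  match ks with
  | [] => []
  | k :: t => if PySem.Set.contains done k then pvNewStems done t
              else k :: pvNewStems (PySem.Set.add done k) t

theorem pvNewStems_spec (ks : List String) (done : PySem.Set String) :
    done ++ pvNewStems done ks = PySem.Set.update done ks := by
  induction ks generalizing done with
  | nil => simp [pvNewStems, PySem.Set.update_nil]
  | cons k t ih =>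
    rw [PySem.Set.update_cons]
    by_cases h : PySem.Set.contains done k
    · rw [pvNewStems, if_pos h, show PySem.Set.add done k = done from
        PySem.Set.add_of_mem ((PySem.Set.contains_iff done k).mp h)]
      exact ih done
    · rw [pvNewStems, if_neg h]
      have hadd : PySem.Set.add done k = done ++ [k] :=
        PySem.Set.add_of_not_mem (fun hm => h ((PySem.Set.contains_iff done k).mpr hm))
      rw [hadd, ← ih (done ++ [k])]
      simp

theorem B_fold (records : List (List (String × String))) (rms : List String) :
    ∀ (l : List (List (String × String))) (out : List (List (String × String))) (done : PySem.Set String),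
    (l.foldl (fun (acc : List (List (String × String)) × PySem.Set String) rec =>
      let stem := pvGet rec "stem"
      if PySem.Set.contains acc.2 stem then acc
      else
        let done := PySem.Set.add acc.2 stem
        if rms.all (fun m =>
             records.any (fun r => pvGet r "stem" == stem && pvGet r "modality" == m))
        then (acc.1 ++ records.filter (fun r => pvGet r "stem" == stem), done)
        else (acc.1, done)) (out, done)).1
    = out ++ (pvNewStems done (l.map (fun r => pvGet r "stem"))).flatMap
        (fun s => if pvTestB records rms s then pvGroup records s else []) := by
  intro l
  induction l with
  | nil => intro out done; simp [pvNewStems]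
  | cons r t ih =>
    intro out done
    rw [List.foldl_cons]
    dsimp only
    by_cases h : PySem.Set.contains done (pvGet r "stem")
    · rw [if_pos h, ih out done, List.map_cons, pvNewStems, if_pos h]
    · rw [if_neg h]
      by_cases hT : pvTestB records rms (pvGet r "stem")
      · rw [if_pos (by simpa [pvTestB] using hT), ih, List.map_cons, pvNewStems, if_neg h]
        simp [List.flatMap_cons, hT, pvGroup, List.append_assoc]
      · rw [if_neg (by simpa [pvTestB] using hT), ih, List.map_cons, pvNewStems, if_neg h]
        simp [List.flatMap_cons, hT, pvGroup]

theorem B_normal (records : List (List (String × String))) (rms : List String) :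
    filter_complete_no_split_py_alt records rms
    = (PySem.Set.ofList (records.map (fun r => pvGet r "stem"))).flatMap
        (fun s => if pvTestB records rms s then pvGroup records s else []) := by
  unfold filter_complete_no_split_py_alt
  rw [B_fold records rms records [] PySem.Set.empty]
  rw [show pvNewStems PySem.Set.empty (records.map (fun r => pvGet r "stem"))
      = PySem.Set.ofList (records.map (fun r => pvGet r "stem")) by
    have := pvNewStems_spec (records.map (fun r => pvGet r "stem")) PySem.Set.empty
    simpa [PySem.Set.update_nil_left] using this]
  simp

theorem test_eq (records : List (List (String × String))) (rms : List String) (s : String) :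
    pvTestA records rms s = pvTestB records rms s := by
  apply Bool.eq_iff_iff.mpr
  simp only [pvTestA, pvTestB, pvGroup]
  simp [PySem.Set.issuperset_iff, PySem.Set.mem_ofList, List.all_eq_true, List.any_eq_true,
        List.mem_map, List.mem_filter, beq_iff_eq]
  constructor
  · intro h m hm
    obtain ⟨r, ⟨hr, hs⟩, hmo⟩ := h m hm
    exact ⟨r, hr, hs, hmo⟩
  · intro h m hm
    obtain ⟨r, hr, hs, hmo⟩ := h m hm
    exact ⟨r, ⟨hr, hs⟩, hmo⟩

theorem AB (records : List (List (String × String))) (rms : List String) :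
    filter_complete_no_split_py records rms = filter_complete_no_split_py_alt records rms := by
  rw [A_normal, B_normal,
    show (fun s => if pvTestA records rms s then pvGroup records s else [])
       = (fun s => if pvTestB records rms s then pvGroup records s else []) from
      funext (fun s => by rw [test_eq])]

-- ===== VERDICT (by name: the statement is the Claim_ definition above) =====
theorem filter_complete_no_split_py_spec : Claim_equal_filter_complete_no_split_py := by
  intro records rms _ _
  unfold Spec_filter_complete_no_split_py
  exact AB records rms
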